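-- pv_equiv track=rewrite | github.com/campingtree/adventofcode | 2020/14/14.py | generate_addr_list
-- ===== SOURCE A (Python) =====
-- from itertools import product
--
-- def generate_addr_list(value_str):
--     c = value_str.count('X')
--     addrs = []
--     for i in product('10', repeat=c):
--         val = list(value_str)
--         j = 0
--         for e in range(len(val)):
--             if val[e] == 'X':
--                 val[e] = i[j]
--                 j += 1
--         addrs.append(''.join(val))
--     return addrs
-- ===== SOURCE B (Python) =====
-- def generate_addr_list(value_str):
--     results = ['']
--     for ch in value_str:
--         if ch == 'X':
--             results = [p + b for p in results for b in '10']
--         else: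
--             results = [p + ch for p in results]
--     return results
-- ===== Notes on version B (the rewrite author's own statement) =====
-- stated objective: simpler
-- what changed: Replaces the itertools.product-over-the-X-count plus per-tuple rescan-and-substitute pass by a single left-to-right fold over the characters that grows a list of prefixes, branching each prefix into the digit one then the digit zero at every wildcard.
import Mathlib
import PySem

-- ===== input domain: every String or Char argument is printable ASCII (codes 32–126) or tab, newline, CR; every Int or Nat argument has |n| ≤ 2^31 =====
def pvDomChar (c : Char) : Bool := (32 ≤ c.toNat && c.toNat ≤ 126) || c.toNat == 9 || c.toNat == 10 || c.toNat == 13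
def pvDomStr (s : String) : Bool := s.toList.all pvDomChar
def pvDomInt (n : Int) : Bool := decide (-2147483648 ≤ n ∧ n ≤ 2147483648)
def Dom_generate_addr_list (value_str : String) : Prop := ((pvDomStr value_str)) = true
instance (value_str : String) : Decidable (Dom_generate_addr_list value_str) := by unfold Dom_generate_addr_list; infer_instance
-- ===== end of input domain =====

-- B replaces the product(c-fold)-then-substitute scheme by one fold over the characters
-- extending a list of prefixes (objective: simpler, same asymptotic cost).

-- ===== PORT A =====
-- product('10', repeat=c): first coordinate varies slowest, '1' before '0'
def pvProd10 : Nat → List (List Char)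
  | 0 => [[]]
  | n + 1 => (pvProd10 n).map (fun t => '1' :: t) ++ (pvProd10 n).map (fun t => '0' :: t)

-- body of A's inner loop over e in range(len(val)): state (val, j); indices are always
-- in range (e < len(val), j < len(i)), so the getD defaults are never used
def pvFillStep (i : List Char) (st : List Char × Nat) (e : Nat) : List Char × Nat :=
  if st.1.getD e ' ' = 'X' then (st.1.set e (i.getD st.2 ' '), st.2 + 1) else st

def generate_addr_list (value_str : String) : List String :=
  let c := PySem.Str.count value_str "X"
  (pvProd10 c).foldl (fun addrs i =>
    let val := value_str.toList
    let st := (List.range val.length).foldl (pvFillStep i) (val, 0)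
    addrs ++ [String.ofList st.1]) []

-- ===== PORT B =====
-- one step of B's fold; strings under construction are kept as List Char
-- (String.ofList at the end) because Lean's String.append is kernel-opaque
def pvStepB (results : List (List Char)) (ch : Char) : List (List Char) :=
  if ch = 'X' then results.flatMap (fun p => ['1', '0'].map (fun b => p ++ [b]))
  else results.map (fun p => p ++ [ch])

def generate_addr_list_alt (value_str : String) : List String :=
  (value_str.toList.foldl pvStepB [[]]).map String.ofList

-- ===== PRECONDITION & SPEC =====
def Spec_generate_addr_list (value_str : String) (out : List String) : Prop := out = generate_addr_list_alt value_str
instance (value_str : String) (out : List String) : Decidable (Spec_generate_addr_list value_str out) := by unfold Spec_generate_addr_list; infer_instance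

-- ===== CLAIM (what is proved, stated in full; the proofs are below) =====
def Claim_equal_generate_addr_list : Prop := ∀ (value_str : String), Dom_generate_addr_list value_str → Spec_generate_addr_list value_str (generate_addr_list value_str)

-- ===== LEMMAS AND PROOFS =====

-- the common abstract form: all substitutions, first X varying slowest, '1' before '0'
def pvGen : List Char → List (List Char)
  | [] => [[]]
  | c :: cs =>
    if c = 'X' then (pvGen cs).map (fun t => '1' :: t) ++ (pvGen cs).map (fun t => '0' :: t)
    else (pvGen cs).map (fun t => c :: t)

-- functional form of A's inner loop: substitute X's of cs by i[j], i[j+1], …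
def pvFillJ (i : List Char) : List Char → Nat → List Char
  | [], _ => []
  | c :: cs, j => if c = 'X' then i.getD j ' ' :: pvFillJ i cs (j + 1) else c :: pvFillJ i cs j

theorem pvFillJ_shift (d : Char) (i : List Char) : ∀ (cs : List Char) (j : Nat),
    pvFillJ (d :: i) cs (j + 1) = pvFillJ i cs j := by
  intro cs
  induction cs with
  | nil => intro j; rfl
  | cons c cs ih =>
    intro j
    by_cases hc : c = 'X' <;> simp [pvFillJ, hc, ih]

-- A's index loop computes pvFillJ
theorem pvFill_loop (i : List Char) : ∀ (suffix acc : List Char) (j k : Nat),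
    acc.length = k + suffix.length → acc.drop k = suffix →
    ((List.range' k suffix.length).foldl (pvFillStep i) (acc, j)).1
      = acc.take k ++ pvFillJ i suffix j := by
  intro suffix
  induction suffix with
  | nil =>
    intro acc j k hlen hdrop
    simp only [List.length_nil] at hlen
    simp [pvFillJ]
    omega
  | cons c cs ih =>
    intro acc j k hlen hdrop
    have hk : k < acc.length := by simp at hlen; omega
    have hget : acc[k]? = some c := by
      have h0 := congrArg (fun l : List Char => l[0]?) hdrop
      simpa [List.getElem?_drop] using h0
    have hdrop1 : acc.drop (k + 1) = cs := by
      have h1 : acc.drop (k + 1) = (acc.drop k).drop 1 := by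
        rw [List.drop_drop]
      rw [h1, hdrop]; rfl
    simp only [List.length_cons]
    rw [List.range'_succ]
    simp only [List.foldl_cons]
    by_cases hc : c = 'X'
    · have hstep : pvFillStep i (acc, j) k = (acc.set k (i.getD j ' '), j + 1) := by
        simp [pvFillStep, hget, hc]
      rw [hstep]
      rw [ih (acc.set k (i.getD j ' ')) (j + 1) (k + 1)
        (by simp at hlen ⊢; omega)
        (by rw [List.drop_set_of_lt (by omega)]; exact hdrop1)]
      have htake : (acc.set k (i.getD j ' ')).take (k + 1)
          = acc.take k ++ [i.getD j ' '] := by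
        rw [List.take_add_one]
        rw [List.take_set_of_le (le_refl k)]
        simp [hk]
      rw [htake]
      simp [pvFillJ, hc, List.append_assoc]
    · have hstep : pvFillStep i (acc, j) k = (acc, j) := by
        simp [pvFillStep, hget, hc]
      rw [hstep]
      rw [ih acc j (k + 1) (by simp at hlen ⊢; omega) hdrop1]
      have htake : acc.take (k + 1) = acc.take k ++ [c] := by
        rw [List.take_add_one]; simp [hget]
      rw [htake]
      simp [pvFillJ, hc, List.append_assoc]

theorem pvFill_loop_zero (i val : List Char) :
    ((List.range val.length).foldl (pvFillStep i) (val, 0)).1 = pvFillJ i val 0 := by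
  rw [List.range_eq_range']
  rw [pvFill_loop i val val 0 0 (by simp) (by simp)]
  simp

-- count bridge: str.count of the one-character pattern 'X' is List.count
theorem pvCount_go (fuel : Nat) : ∀ (l : List Char) (acc : Nat), l.length ≤ fuel →
    PySem.Chars.count.go ['X'] fuel l acc = acc + l.count 'X' := by
  induction fuel with
  | zero =>
    intro l acc hl
    have hnil : l = [] := by cases l <;> simp_all
    subst hnil
    simp [PySem.Chars.count.go]
  | succ f ih =>
    intro l acc hl
    cases l with
    | nil => simp [PySem.Chars.count.go]
    | cons h t =>
      rw [PySem.Chars.count.go]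
      by_cases hh : h = 'X'
      · have hpre : List.isPrefixOf ['X'] (h :: t) = true := by
          simp [List.isPrefixOf, hh]
        simp only [hpre, if_true]
        have hdrop : List.drop (['X'] : List Char).length (h :: t) = t := by simp
        rw [hdrop, ih t (acc + 1) (by simp at hl; omega)]
        subst hh
        simp
        omega
      · have h' : ¬('X' = h) := fun hx => hh hx.symm
        have hpre : List.isPrefixOf ['X'] (h :: t) = false := by
          simp [List.isPrefixOf]
          exact h'
        simp only [hpre, Bool.false_eq_true, if_false]
        rw [ih t acc (by simp at hl; omega)]
        simp [hh]

theorem pvCount_X (s : List Char) : PySem.Chars.count s ['X'] = s.count 'X' := by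
  unfold PySem.Chars.count
  simp only [List.isEmpty_cons, Bool.false_eq_true, if_false]
  rw [pvCount_go s.length s 0 (le_refl _)]
  simp

-- A's product-then-substitute equals pvGen
theorem pvA_gen : ∀ (val : List Char),
    (pvProd10 (val.count 'X')).map (fun i => pvFillJ i val 0) = pvGen val := by
  intro val
  induction val with
  | nil => simp [pvGen, pvProd10, pvFillJ]
  | cons c cs ih =>
    by_cases hc : c = 'X'
    · subst hc
      have hcount : ('X' :: cs).count 'X' = cs.count 'X' + 1 := by simp
      rw [hcount]
      simp only [pvProd10, List.map_append, List.map_map, pvGen, if_true]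
      have h1 : ∀ d : Char, (fun i => pvFillJ i ('X' :: cs) 0) ∘ (fun t => d :: t)
          = (fun t => d :: t) ∘ (fun i => pvFillJ i cs 0) := by
        intro d; funext t
        simp [pvFillJ, pvFillJ_shift, List.getD]
      rw [h1 '1', h1 '0', ← List.map_map, ← List.map_map, ih]
    · have hcount : (c :: cs).count 'X' = cs.count 'X' := by
        simp [hc]
      rw [hcount]
      have h2 : (fun i => pvFillJ i (c :: cs) 0)
          = (fun t => c :: t) ∘ (fun i => pvFillJ i cs 0) := by
        funext i; simp [pvFillJ, hc]
      rw [h2, ← List.map_map, ih]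
      simp [pvGen, hc]

-- B's fold from any prefix list
theorem pvB_fold : ∀ (cs : List Char) (rs : List (List Char)),
    cs.foldl pvStepB rs = rs.flatMap (fun p => (pvGen cs).map (fun t => p ++ t)) := by
  intro cs
  induction cs with
  | nil => intro rs; simp [pvGen]
  | cons c cs ih =>
    intro rs
    rw [List.foldl_cons, ih]
    by_cases hc : c = 'X'
    · subst hc
      simp only [pvStepB, if_true, pvGen, List.flatMap_assoc]
      have h1 : (fun p : List Char => (List.map (fun b => p ++ [b]) ['1', '0']).flatMap
            (fun q => List.map (fun t => q ++ t) (pvGen cs)))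
          = fun p : List Char => List.map (fun t => p ++ t)
              (List.map (fun t => '1' :: t) (pvGen cs) ++ List.map (fun t => '0' :: t) (pvGen cs)) := by
        funext p
        simp [List.map_map, Function.comp_def, List.append_assoc]
      rw [h1]
    · simp only [pvStepB, hc, if_false, pvGen]
      rw [List.flatMap_map]
      have h2 : (fun a : List Char => List.map (fun t => a ++ [c] ++ t) (pvGen cs))
          = fun p : List Char => List.map (fun t => p ++ t)
              ((pvGen cs).map (fun t => c :: t)) := by
        funext p
        simp [List.map_map, List.append_assoc]
      rw [h2]

-- ===== VERDICT (by name: the statement is the Claim_ definition above) =====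
theorem generate_addr_list_spec : Claim_equal_generate_addr_list := by
  intro value_str _
  unfold Spec_generate_addr_list generate_addr_list generate_addr_list_alt
  rw [pvB_fold]
  have hc : PySem.Str.count value_str "X" = value_str.toList.count 'X' := by
    simp [PySem.Str.count]
    rw [pvCount_X]
  rw [hc]
  rw [PySem.List.foldl_append_singleton_eq_map]
  have hfill : (fun i => String.ofList (((List.range value_str.toList.length).foldl (pvFillStep i) (value_str.toList, 0)).1))
      = (fun i => String.ofList (pvFillJ i value_str.toList 0)) := by
    funext i; rw [pvFill_loop_zero]
  simp only [hfill]
  have hcomp : (fun i => String.ofList (pvFillJ i value_str.toList 0))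
      = String.ofList ∘ (fun i => pvFillJ i value_str.toList 0) := rfl
  rw [hcomp, ← List.map_map, pvA_gen]
  simp
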